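-- pv_equiv track=rewrite | github.com/BernardoCosta13/FP_Exams_Training | Exam_2_Ex-3.py | neighbourMines
-- ===== SOURCE A (Python) =====
-- def hasMine(listP, r, c):
--     return 0 <= r < len(listP) and 0 <= c < len(listP[0]) and listP[r][c] == '#'
--
-- def neighbourMines(listP):
--     dictMines = {}
--
--     for r in range(len(listP)):
--         for c in range(len(listP[0])):
--             if listP[r][c] == '-':
--                 mines_count = 0
--                 positions = []
--
--                 # Check in all eight directions (horizontal, vertical, and diagonal)
--                 for dr in [-1, 0, 1]:
--                     for dc in [-1, 0, 1]:
--                         if dr == 0 and dc == 0: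
--                             continue
--
--                         nr, nc = r + dr, c + dc
--                         if hasMine(listP, nr, nc):
--                             mines_count += 1
--                             positions.append((nr, nc))
--
--                 if mines_count > 0:
--                     dictMines.setdefault(mines_count, []).append((r, c))
--
--     return dictMines
-- ===== SOURCE B (Python) =====
-- def neighbourMines(listP):
--     if not listP:
--         return {}
--     h, w = len(listP), len(listP[0])
--     # scatter: each mine adds 1 to every in-bounds neighbour's count
--     counts = {}
--     for r in range(h):
--         for c in range(w):
--             if listP[r][c] == '#':
--                 for nr in range(r - 1, r + 2):
--                     for nc in range(c - 1, c + 2):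
--                         if (nr, nc) != (r, c) and 0 <= nr < h and 0 <= nc < w:
--                             counts[(nr, nc)] = counts.get((nr, nc), 0) + 1
--     # gather in row-major order
--     dictMines = {}
--     for r in range(h):
--         for c in range(w):
--             cnt = counts.get((r, c), 0)
--             if listP[r][c] == '-' and cnt > 0:
--                 dictMines.setdefault(cnt, []).append((r, c))
--     return dictMines
-- ===== Notes on version B (the rewrite author's own statement) =====
-- stated objective: alternative
-- what changed: Instead of scanning all 8 neighbours of every cell, B makes one scatter pass that increments a count-table entry for each in-bounds neighbour of each mine, then a second row-major gather pass that groups '-' cells by their table count; per-cell work is proportional to the number of mines, not a fixed 8-way probe.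
import Mathlib
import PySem

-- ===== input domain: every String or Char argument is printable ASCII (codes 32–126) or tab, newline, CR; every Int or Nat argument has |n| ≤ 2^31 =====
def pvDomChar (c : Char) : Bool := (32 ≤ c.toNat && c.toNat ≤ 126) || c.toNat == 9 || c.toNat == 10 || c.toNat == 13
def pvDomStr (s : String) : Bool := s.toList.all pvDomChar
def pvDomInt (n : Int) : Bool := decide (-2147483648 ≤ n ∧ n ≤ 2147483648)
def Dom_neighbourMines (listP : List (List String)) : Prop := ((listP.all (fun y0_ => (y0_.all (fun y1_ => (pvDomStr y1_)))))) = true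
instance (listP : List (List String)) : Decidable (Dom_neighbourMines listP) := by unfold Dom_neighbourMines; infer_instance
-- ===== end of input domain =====

-- B replaces A's per-cell 8-neighbour scan by a scatter pass over the mines plus a row-major gather pass.

-- ===== PORT A =====
def hasMine (listP : List (List String)) (r c : Int) : Bool :=
  decide (0 ≤ r) && decide (r < PySem.List.len listP) && decide (0 ≤ c)
    && decide (c < PySem.List.len (PySem.List.pyGetD listP 0 []))
    && (PySem.List.pyGetD (PySem.List.pyGetD listP r []) c "" == "#")

-- the inner 'for dr … for dc …' loop of A: (mines_count, positions)
def mineScan (listP : List (List String)) (r c : Int) : Int × List (Int × Int) :=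
  ([-1, 0, 1] : List Int).foldl (fun st dr =>
    ([-1, 0, 1] : List Int).foldl (fun st dc =>
      if dr == 0 && dc == 0 then st
      else if hasMine listP (r + dr) (c + dc) then (st.1 + 1, st.2 ++ [(r + dr, c + dc)])
      else st) st) (0, [])

def neighbourMines (listP : List (List String)) : List (Int × List (Int × Int)) :=
  ((PySem.List.pyRange 0 (PySem.List.len listP) 1).foldl (fun d r =>
    (PySem.List.pyRange 0 (PySem.List.len (PySem.List.pyGetD listP 0 [])) 1).foldl (fun d c =>
      if PySem.List.pyGetD (PySem.List.pyGetD listP r []) c "" == "-" then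
        let res := mineScan listP r c
        if res.1 > 0 then d.modify res.1 [] (· ++ [(r, c)]) else d
      else d) d) (PySem.Dict.empty : PySem.Dict Int (List (Int × Int)))).items

-- ===== PORT B =====
-- first pass of Source B: the scatter that builds the per-cell mine-count table
def altCounts (listP : List (List String)) (h w : Int) : PySem.Dict (Int × Int) Int :=
  (PySem.List.pyRange 0 h 1).foldl (fun d r =>
    (PySem.List.pyRange 0 w 1).foldl (fun d c =>
      if PySem.List.pyGetD (PySem.List.pyGetD listP r []) c "" == "#" then
        (PySem.List.pyRange (r - 1) (r + 2) 1).foldl (fun d nr =>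
          (PySem.List.pyRange (c - 1) (c + 2) 1).foldl (fun d nc =>
            if !((nr, nc) == (r, c)) && decide (0 ≤ nr ∧ nr < h) && decide (0 ≤ nc ∧ nc < w)
            then d.modify (nr, nc) 0 (· + 1) else d) d) d
      else d) d) PySem.Dict.empty

def neighbourMines_alt (listP : List (List String)) : List (Int × List (Int × Int)) :=
  if listP.isEmpty then [] else
  let h : Int := PySem.List.len listP
  let w : Int := PySem.List.len (PySem.List.pyGetD listP 0 [])
  ((PySem.List.pyRange 0 h 1).foldl (fun d r =>
    (PySem.List.pyRange 0 w 1).foldl (fun d c =>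
      let cnt := (altCounts listP h w).getD (r, c) 0
      if (PySem.List.pyGetD (PySem.List.pyGetD listP r []) c "" == "-") && decide (cnt > 0)
      then d.modify cnt [] (· ++ [(r, c)]) else d) d)
    (PySem.Dict.empty : PySem.Dict Int (List (Int × Int)))).items

-- ===== PRECONDITION & SPEC =====
-- Pre_ excludes exactly the ragged grids on which A raises IndexError: some row shorter than the first row.
def Pre_neighbourMines (listP : List (List String)) : Prop :=
  ∀ row ∈ listP, (listP.headD []).length ≤ row.length
instance (listP : List (List String)) : Decidable (Pre_neighbourMines listP) := by unfold Pre_neighbourMines; infer_instance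

def pvWitness_neighbourMines : List (List String) := [["-", "#"], ["#", "-"]]

def Spec_neighbourMines (listP : List (List String)) (out : List (Int × List (Int × Int))) : Prop := out = neighbourMines_alt listP
instance (listP : List (List String)) (out : List (Int × List (Int × Int))) : Decidable (Spec_neighbourMines listP out) := by unfold Spec_neighbourMines; infer_instance

-- ===== CLAIM (what is proved, stated in full; the proofs are below) =====
def Claim_equal_neighbourMines : Prop := ∀ (listP : List (List String)), Dom_neighbourMines listP → Pre_neighbourMines listP → Spec_neighbourMines listP (neighbourMines listP)

-- ===== LEMMAS AND PROOFS =====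

-- proof-side vocabulary
def nmL9 : List (Int × Int) := [(-1,-1),(-1,0),(-1,1),(0,-1),(0,0),(0,1),(1,-1),(1,0),(1,1)]
def nmL8 : List (Int × Int) := [(-1,-1),(-1,0),(-1,1),(0,-1),(0,1),(1,-1),(1,0),(1,1)]
def nmStr (P : List (List String)) (p : Int × Int) : String :=
  PySem.List.pyGetD (PySem.List.pyGetD P p.1 []) p.2 ""
def nmInb (h w : Int) (p : Int × Int) : Bool :=
  decide (0 ≤ p.1 ∧ p.1 < h) && decide (0 ≤ p.2 ∧ p.2 < w)
def nmCells (h w : Int) : List (Int × Int) :=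
  (PySem.List.pyRange 0 h 1).flatMap (fun r => (PySem.List.pyRange 0 w 1).map (fun c => (r, c)))
def nmFc (h w : Int) (cell q : Int × Int) : Bool :=
  !(q == cell) && decide (0 ≤ q.1 ∧ q.1 < h) && decide (0 ≤ q.2 ∧ q.2 < w)
def nmE (P : List (List String)) (h w : Int) (cell : Int × Int) : List (Int × Int) :=
  if nmStr P cell == "#" then
    (nmL9.map (fun δ => (cell.1 + δ.1, cell.2 + δ.2))).filter (nmFc h w cell)
  else []
def nmScanF (P : List (List String)) (r c : Int)
    (st : Int × List (Int × Int)) (δ : Int × Int) : Int × List (Int × Int) :=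
  if δ.1 == 0 && δ.2 == 0 then st
  else if hasMine P (r + δ.1) (c + δ.2) then (st.1 + 1, st.2 ++ [(r + δ.1, c + δ.2)])
  else st
def nmScatter (P : List (List String)) (h w : Int)
    (d : PySem.Dict (Int × Int) Int) (cell : Int × Int) : PySem.Dict (Int × Int) Int :=
  if nmStr P cell == "#" then
    (PySem.List.pyRange (cell.1 - 1) (cell.1 + 2) 1).foldl (fun d nr =>
      (PySem.List.pyRange (cell.2 - 1) (cell.2 + 2) 1).foldl (fun d nc =>
        if nmFc h w cell (nr, nc) then d.modify (nr, nc) 0 (· + 1) else d) d) d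
  else d
def nmG (P : List (List String)) (h w : Int) (p cell δ : Int × Int) : Bool :=
  (nmStr P cell == "#") &&
    ((((cell.1 + δ.1, cell.2 + δ.2) : Int × Int) == p) && nmFc h w cell (cell.1 + δ.1, cell.2 + δ.2))
def nmGA (P : List (List String)) (d : PySem.Dict Int (List (Int × Int))) (q : Int × Int) :
    PySem.Dict Int (List (Int × Int)) :=
  if nmStr P q == "-" then
    if (mineScan P q.1 q.2).1 > 0 then d.modify (mineScan P q.1 q.2).1 [] (· ++ [(q.1, q.2)]) else d
  else d
def nmGB (P : List (List String)) (h w : Int) (d : PySem.Dict Int (List (Int × Int))) (q : Int × Int) :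
    PySem.Dict Int (List (Int × Int)) :=
  if (nmStr P q == "-") && decide ((altCounts P h w).getD q 0 > 0)
  then d.modify ((altCounts P h w).getD q 0) [] (· ++ [(q.1, q.2)]) else d

-- a nested loop over two lists is one loop over the list of pairs
lemma nm_foldl_pairs {β : Type} (xs ys : List Int) (f : β → Int × Int → β) (d : β) :
    xs.foldl (fun d a => ys.foldl (fun d b => f d (a, b)) d) d
      = (xs.flatMap (fun a => ys.map (fun b => (a, b)))).foldl f d := by
  simp [List.foldl_flatMap, List.foldl_map]

lemma nm_range3 (x : Int) : PySem.List.pyRange (x - 1) (x + 2) 1 = [x - 1, x, x + 1] := by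
  rw [PySem.List.pyRange_one_cons (by omega), PySem.List.pyRange_one_cons (by omega),
    PySem.List.pyRange_one_cons (by omega), PySem.List.pyRange_one_eq_nil (by omega)]
  rw [show x - 1 + 1 = x by omega]

lemma nm_nine (r c : Int) :
    (([r - 1, r, r + 1] : List Int).flatMap (fun a => ([c - 1, c, c + 1] : List Int).map (fun b => (a, b))))
      = nmL9.map (fun δ => (r + δ.1, c + δ.2)) := by
  simp [nmL9, Prod.ext_iff]
  omega

lemma nm_countP_congr (l : List (Int × Int)) (p q : Int × Int → Bool)
    (h : ∀ a ∈ l, p a = q a) : l.countP p = l.countP q := by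
  induction l with
  | nil => simp
  | cons x xs ih =>
    rw [List.countP_cons, List.countP_cons, h x (by simp), ih (fun a ha => h a (by simp [ha]))]

lemma nm_countP_filter (l : List (Int × Int)) (p q : Int × Int → Bool) :
    (l.filter q).countP p = l.countP (fun a => p a && q a) := by
  induction l with
  | nil => simp
  | cons x xs ih =>
    by_cases hq : q x = true
    · simp [hq, List.countP_cons, ih]
    · have hq' : q x = false := by simpa using hq
      simp [hq', ih]

lemma nm_countP_flatMap (l : List (Int × Int)) (f : Int × Int → List (Int × Int))
    (q : Int × Int → Bool) :
    (l.flatMap f).countP q = (l.map (fun x => (f x).countP q)).sum := by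
  induction l with
  | nil => simp
  | cons x xs ih => simp [List.flatMap_cons, List.countP_append, ih]

lemma nm_swap (l m : List (Int × Int)) (g : Int × Int → Int × Int → Bool) :
    (l.map (fun a => m.countP (g a))).sum = (m.map (fun b => l.countP (fun a => g a b))).sum := by
  induction l with
  | nil => simp
  | cons x xs ih =>
    simp only [List.map_cons, List.sum_cons, ih, List.countP_cons]
    rw [List.sum_map_add, PySem.List.sum_map_ite_one_zero_nat]
    omega

lemma nm_countP_single (l : List (Int × Int)) (hl : l.Nodup) (v : Int × Int)
    (q : Int × Int → Bool) :
    l.countP (fun x => x == v && q x) = if v ∈ l ∧ q v = true then 1 else 0 := by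
  induction l with
  | nil => simp
  | cons x xs ih =>
    rw [List.countP_cons, ih (List.nodup_cons.mp hl).2]
    by_cases hxv : x = v
    · subst hxv
      have hx : x ∉ xs := (List.nodup_cons.mp hl).1
      by_cases hq : q x = true
      · simp [hx, hq]
      · have hq' : q x = false := by simpa using hq
        simp [hx, hq']
    · have h1 : (x == v) = false := by simp [hxv]
      have h2 : ¬ v = x := fun h => hxv h.symm
      simp [h1, h2]

lemma nm_mem_cells (h w : Int) (q : Int × Int) :
    q ∈ nmCells h w ↔ ((0 ≤ q.1 ∧ q.1 < h) ∧ (0 ≤ q.2 ∧ q.2 < w)) := by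
  unfold nmCells
  simp only [List.mem_flatMap, List.mem_map, PySem.List.mem_pyRange_one]
  constructor
  · rintro ⟨r, hr, c, hc, rfl⟩; exact ⟨hr, hc⟩
  · rintro ⟨h1, h2⟩; exact ⟨q.1, h1, q.2, h2, rfl⟩

lemma nm_nodup_cells (h w : Int) : (nmCells h w).Nodup := by
  unfold nmCells
  refine List.nodup_flatMap.2 ⟨fun r _ => ?_, ?_⟩
  · exact (PySem.List.nodup_pyRange_one 0 w).map (fun a b hab => congrArg Prod.snd hab)
  · refine List.Pairwise.imp ?_ (PySem.List.pairwise_lt_pyRange_one 0 h)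
    intro r1 r2 hlt x hx1 hx2
    simp only [List.mem_map] at hx1 hx2
    obtain ⟨c1, -, rfl⟩ := hx1
    obtain ⟨c2, -, h2⟩ := hx2
    injection h2 with h21 h22
    omega

-- A's inner scan counts exactly the 8 offsets whose shifted cell has a mine
lemma nm_scan_fst (P : List (List String)) (r c : Int) (l : List (Int × Int))
    (st : Int × List (Int × Int)) :
    (l.foldl (nmScanF P r c) st).1
      = st.1 + (l.countP (fun δ => !(δ.1 == 0 && δ.2 == 0) && hasMine P (r + δ.1) (c + δ.2)) : Int) := by
  induction l generalizing st with
  | nil => simp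
  | cons x xs ih =>
    rw [List.foldl_cons, List.countP_cons, ih]
    unfold nmScanF
    by_cases h1 : (x.1 == 0 && x.2 == 0) = true
    · simp [h1]
    · have h1' : (x.1 == 0 && x.2 == 0) = false := by simpa using h1
      by_cases h2 : hasMine P (r + x.1) (c + x.2) = true
      · simp only [h1', Bool.false_eq_true, if_false, h2, if_true, Bool.not_false, Bool.true_and]
        push_cast
        ring
      · have h2' : hasMine P (r + x.1) (c + x.2) = false := by simpa using h2
        simp [h1', h2']

lemma nm_countP_guard (q : Int × Int → Bool) :
    nmL9.countP (fun δ => !(δ.1 == 0 && δ.2 == 0) && q δ) = nmL8.countP q := by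
  simp [nmL9, nmL8, List.countP_cons]

lemma nm_mineScan (P : List (List String)) (r c : Int) :
    (mineScan P r c).1 = (nmL8.countP (fun δ => hasMine P (r + δ.1) (c + δ.2)) : Int) := by
  have h0 : mineScan P r c = nmL9.foldl (nmScanF P r c) ((0 : Int), ([] : List (Int × Int))) :=
    nm_foldl_pairs [-1, 0, 1] [-1, 0, 1] (nmScanF P r c) ((0 : Int), ([] : List (Int × Int)))
  rw [h0, nm_scan_fst, nm_countP_guard]
  simp

-- B's scatter step at one cell is a fold of unit increments over nmE
lemma nm_scatter_eq (P : List (List String)) (h w : Int) (d : PySem.Dict (Int × Int) Int)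
    (cell : Int × Int) :
    nmScatter P h w d cell = (nmE P h w cell).foldl (fun d q => d.modify q 0 (· + 1)) d := by
  unfold nmScatter nmE
  by_cases hm : (nmStr P cell == "#") = true
  · rw [if_pos hm, if_pos hm, nm_range3, nm_range3]
    have h3 : ([cell.1 - 1, cell.1, cell.1 + 1] : List Int).foldl (fun d nr =>
        ([cell.2 - 1, cell.2, cell.2 + 1] : List Int).foldl (fun d nc =>
          if nmFc h w cell (nr, nc) then d.modify (nr, nc) 0 (· + 1) else d) d) d
        = (([cell.1 - 1, cell.1, cell.1 + 1] : List Int).flatMap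
            (fun a => ([cell.2 - 1, cell.2, cell.2 + 1] : List Int).map (fun b => (a, b)))).foldl
          (fun d q => if nmFc h w cell q then d.modify q 0 (· + 1) else d) d :=
      nm_foldl_pairs _ _ (fun d q => if nmFc h w cell q then d.modify q 0 (· + 1) else d) d
    rw [h3, nm_nine, PySem.List.foldl_if_eq_foldl_filter]
  · rw [if_neg hm, if_neg hm]
    rfl

lemma nm_altCounts_eq (P : List (List String)) (h w : Int) :
    altCounts P h w = (nmCells h w).foldl (nmScatter P h w) PySem.Dict.empty :=
  nm_foldl_pairs (PySem.List.pyRange 0 h 1) (PySem.List.pyRange 0 w 1) (nmScatter P h w) PySem.Dict.empty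

lemma nm_counts_flat (P : List (List String)) (h w : Int) :
    altCounts P h w
      = ((nmCells h w).flatMap (nmE P h w)).foldl (fun d q => d.modify q 0 (· + 1)) PySem.Dict.empty := by
  rw [nm_altCounts_eq, List.foldl_flatMap]
  exact PySem.List.foldl_congr_mem _ _ _ _ (fun d cell _ => nm_scatter_eq P h w d cell)

lemma nm_counts_getD (P : List (List String)) (h w : Int) (p : Int × Int) :
    (altCounts P h w).getD p 0 = (((nmCells h w).flatMap (nmE P h w)).count p : Int) := by
  rw [nm_counts_flat, PySem.Dict.getD_foldl_modify_add_one]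
  simp

lemma nm_hasMine (P : List (List String)) (x y : Int) :
    hasMine P x y
      = (nmInb (PySem.List.len P) (PySem.List.len (PySem.List.pyGetD P 0 [])) (x, y)
          && (nmStr P (x, y) == "#")) := by
  have hiff : (hasMine P x y = true)
      ↔ ((nmInb (PySem.List.len P) (PySem.List.len (PySem.List.pyGetD P 0 [])) (x, y)
          && (nmStr P (x, y) == "#")) = true) := by
    simp [hasMine, nmInb, nmStr, Bool.and_eq_true, decide_eq_true_eq]
    tauto
  exact Bool.eq_iff_iff.mpr hiff

-- the double-counting exchange: the scatter table at an in-bounds cell p counts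
-- exactly the mines among p's 8 neighbours
lemma nm_flat_count (P : List (List String)) (h w : Int)
    (hh : h = PySem.List.len P) (hw : w = PySem.List.len (PySem.List.pyGetD P 0 []))
    (p : Int × Int) (hp : nmInb h w p = true) :
    ((nmCells h w).flatMap (nmE P h w)).count p
      = nmL8.countP (fun δ => hasMine P (p.1 + δ.1) (p.2 + δ.2)) := by
  obtain ⟨hp1, hp2⟩ : (0 ≤ p.1 ∧ p.1 < h) ∧ (0 ≤ p.2 ∧ p.2 < w) := by
    simpa [nmInb] using hp
  rw [List.count_eq_countP, nm_countP_flatMap]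
  have hcell : ∀ cell ∈ nmCells h w,
      (nmE P h w cell).countP (· == p) = nmL9.countP (nmG P h w p cell) := by
    intro cell _
    unfold nmE
    by_cases hm : (nmStr P cell == "#") = true
    · rw [if_pos hm, nm_countP_filter, List.countP_map]
      refine nm_countP_congr _ _ _ ?_
      intro δ _
      simp [nmG, hm, Function.comp]
    · have hm' : (nmStr P cell == "#") = false := by simpa using hm
      rw [if_neg hm]
      rw [nm_countP_congr nmL9 _ (fun _ => false) (fun a _ => by simp [nmG, hm'])]
      simp
  rw [List.map_congr_left hcell, nm_swap]
  have hδ : ∀ δ ∈ nmL9,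
      (nmCells h w).countP (fun cell => nmG P h w p cell δ)
        = if ((nmInb h w (p.1 - δ.1, p.2 - δ.2) && (nmStr P (p.1 - δ.1, p.2 - δ.2) == "#"))
              && !(δ == ((0, 0) : Int × Int))) = true then 1 else 0 := by
    intro δ _
    have hcongr : ∀ cell ∈ nmCells h w,
        nmG P h w p cell δ = ((cell == ((p.1 - δ.1, p.2 - δ.2) : Int × Int)) && nmG P h w p cell δ) := by
      intro cell _
      by_cases hg : nmG P h w p cell δ = true
      · have hcv : cell = ((p.1 - δ.1, p.2 - δ.2) : Int × Int) := by
          have hg' := hg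
          unfold nmG at hg'
          simp only [Bool.and_eq_true, beq_iff_eq] at hg'
          obtain ⟨-, hsh, -⟩ := hg'
          have e1 : cell.1 + δ.1 = p.1 := congrArg Prod.fst hsh
          have e2 : cell.2 + δ.2 = p.2 := congrArg Prod.snd hsh
          rw [Prod.ext_iff]
          constructor <;> simp <;> omega
        simp [hcv]
      · have hg' : nmG P h w p cell δ = false := by simpa using hg
        simp [hg']
    rw [nm_countP_congr _ _ _ hcongr, nm_countP_single _ (nm_nodup_cells h w)]
    have hsh : ((((p.1 - δ.1, p.2 - δ.2) : Int × Int).1 + δ.1,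
        ((p.1 - δ.1, p.2 - δ.2) : Int × Int).2 + δ.2) : Int × Int) = p := by
      rw [Prod.ext_iff]
      constructor <;> simp
    have hpv : (p == ((p.1 - δ.1, p.2 - δ.2) : Int × Int)) = (δ == ((0, 0) : Int × Int)) := by
      by_cases h0 : δ = ((0, 0) : Int × Int)
      · subst h0
        simp
      · have hne1 : ¬ p = ((p.1 - δ.1, p.2 - δ.2) : Int × Int) := by
          intro hcon
          apply h0
          rw [Prod.ext_iff] at hcon ⊢
          simp at hcon ⊢
          omega
        simp [hne1, h0]
    have hGv : nmG P h w p ((p.1 - δ.1, p.2 - δ.2) : Int × Int) δ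
        = ((nmStr P ((p.1 - δ.1, p.2 - δ.2) : Int × Int) == "#") && !(δ == ((0, 0) : Int × Int))) := by
      unfold nmG nmFc
      rw [hsh]
      simp [hpv, hp1, hp2]
    have hmem : ((p.1 - δ.1, p.2 - δ.2) : Int × Int) ∈ nmCells h w
        ↔ nmInb h w ((p.1 - δ.1, p.2 - δ.2) : Int × Int) = true := by
      rw [nm_mem_cells]
      simp [nmInb]
    have hiff : (((p.1 - δ.1, p.2 - δ.2) : Int × Int) ∈ nmCells h w
          ∧ nmG P h w p ((p.1 - δ.1, p.2 - δ.2) : Int × Int) δ = true)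
        ↔ (((nmInb h w (p.1 - δ.1, p.2 - δ.2) && (nmStr P (p.1 - δ.1, p.2 - δ.2) == "#"))
              && !(δ == ((0, 0) : Int × Int))) = true) := by
      rw [hmem, hGv]
      simp only [Bool.and_eq_true]
      tauto
    exact if_congr hiff rfl rfl
  rw [List.map_congr_left hδ]
  subst hh hw
  simp only [nm_hasMine]
  simp [nmL9, nmL8, List.countP_cons, sub_neg_eq_add, sub_zero, add_zero, ← sub_eq_add_neg]
  omega

lemma nm_cnt (P : List (List String)) (h w : Int)
    (hh : h = PySem.List.len P) (hw : w = PySem.List.len (PySem.List.pyGetD P 0 []))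
    (q : Int × Int) (hq : q ∈ nmCells h w) :
    (altCounts P h w).getD q 0 = (mineScan P q.1 q.2).1 := by
  have hb := (nm_mem_cells h w q).mp hq
  have hp : nmInb h w q = true := by
    simp only [nmInb, Bool.and_eq_true, decide_eq_true_eq]
    exact hb
  rw [nm_counts_getD, nm_flat_count P h w hh hw q hp, nm_mineScan]

lemma nm_step_eq (P : List (List String)) (d : PySem.Dict Int (List (Int × Int))) (q : Int × Int)
    (hq : q ∈ nmCells (PySem.List.len P) (PySem.List.len (PySem.List.pyGetD P 0 []))) :
    nmGA P d q = nmGB P (PySem.List.len P) (PySem.List.len (PySem.List.pyGetD P 0 [])) d q := by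
  have hcnt := nm_cnt P _ _ rfl rfl q hq
  unfold nmGA nmGB
  rw [hcnt]
  by_cases hs : (nmStr P q == "-") = true
  · by_cases hc : (mineScan P q.1 q.2).1 > 0
    · rw [if_pos hs, if_pos hc, if_pos (by simp [hs, hc])]
    · rw [if_pos hs, if_neg hc, if_neg (by simp [hs, hc])]
  · have hs' : (nmStr P q == "-") = false := by simpa using hs
    rw [if_neg hs, if_neg (by simp [hs'])]

lemma nm_A_eq (P : List (List String)) :
    neighbourMines P
      = ((nmCells (PySem.List.len P) (PySem.List.len (PySem.List.pyGetD P 0 []))).foldl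
          (nmGA P) PySem.Dict.empty).items :=
  congrArg PySem.Dict.items
    (nm_foldl_pairs (PySem.List.pyRange 0 (PySem.List.len P) 1)
      (PySem.List.pyRange 0 (PySem.List.len (PySem.List.pyGetD P 0 [])) 1) (nmGA P) PySem.Dict.empty)

lemma nm_B_eq (P : List (List String)) (hP : P ≠ []) :
    neighbourMines_alt P
      = ((nmCells (PySem.List.len P) (PySem.List.len (PySem.List.pyGetD P 0 []))).foldl
          (nmGB P (PySem.List.len P) (PySem.List.len (PySem.List.pyGetD P 0 []))) PySem.Dict.empty).items := by
  unfold neighbourMines_alt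
  rw [if_neg (by simp [hP])]
  exact congrArg PySem.Dict.items
    (nm_foldl_pairs (PySem.List.pyRange 0 (PySem.List.len P) 1)
      (PySem.List.pyRange 0 (PySem.List.len (PySem.List.pyGetD P 0 [])) 1)
      (nmGB P (PySem.List.len P) (PySem.List.len (PySem.List.pyGetD P 0 []))) PySem.Dict.empty)

-- ===== VERDICT (by name: the statement is the Claim_ definition above) =====
theorem neighbourMines_spec : Claim_equal_neighbourMines := by
  intro P _ _
  unfold Spec_neighbourMines
  by_cases hP : P = []
  · subst hP; rfl
  · rw [nm_A_eq P, nm_B_eq P hP]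
    exact congrArg PySem.Dict.items
      (PySem.List.foldl_congr_mem _ _ _ _ (fun d q hq => nm_step_eq P d q hq))
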